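-- pv_equiv track=rewrite | github.com/TaegyunB/TIL | Python/Algorithm/Problem_Solving/practice/20551_increasing_candy_sequence/20551_increasing_candy_sequence.py | calculate
-- ===== SOURCE A (Python) =====
-- def calculate(A, B, C):
--     cnt = 0
--
--     if B < 2 or C < 3:  # 어떤 방식으로 먹더라도 사탕의 개수가 순증가 할 수 없으면
--         return -1
--
--     while C <= B:  # C가 B보다 커질 때 까지
--         B -= 1
--         cnt += 1
--
--     while B <= A:  # B가 A보다 커질 때 까지
--         A -= 1
--         cnt += 1
--
--     return cnt
-- ===== SOURCE B (Python) =====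
-- def calculate(A, B, C):
--     if B < 2 or C < 3:
--         return -1
--     d1 = max(0, B - C + 1)
--     d2 = max(0, A - (B - d1) + 1)
--     return d1 + d2
-- ===== Notes on version B (the rewrite author's own statement) =====
-- stated objective: faster
-- what changed: Replaces the two decrement-and-count while loops with closed-form arithmetic (d1 = max(0, B-C+1), d2 = max(0, A-(B-d1)+1)).
import Mathlib
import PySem

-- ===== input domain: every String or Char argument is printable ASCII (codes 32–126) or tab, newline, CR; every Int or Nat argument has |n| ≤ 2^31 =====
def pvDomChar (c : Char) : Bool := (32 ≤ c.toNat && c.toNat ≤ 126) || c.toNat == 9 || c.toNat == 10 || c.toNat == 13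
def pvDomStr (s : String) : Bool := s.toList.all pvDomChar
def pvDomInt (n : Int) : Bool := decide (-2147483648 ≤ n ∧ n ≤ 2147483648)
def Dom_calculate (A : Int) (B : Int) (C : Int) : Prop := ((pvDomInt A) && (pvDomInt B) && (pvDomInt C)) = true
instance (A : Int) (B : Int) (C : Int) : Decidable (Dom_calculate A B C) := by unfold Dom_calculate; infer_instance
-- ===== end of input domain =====

-- B replaces A's two decrement-and-count while loops with closed-form arithmetic (faster).
-- ===== PORT A =====
-- while C <= B: B -= 1; cnt += 1
def calcLoopC (B : Int) (C : Int) (cnt : Int) : Int × Int :=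
  if C ≤ B then calcLoopC (B - 1) C (cnt + 1) else (B, cnt)
termination_by (B - C + 1).toNat
decreasing_by omega

-- while B <= A: A -= 1; cnt += 1
def calcLoopB (A : Int) (B : Int) (cnt : Int) : Int :=
  if B ≤ A then calcLoopB (A - 1) B (cnt + 1) else cnt
termination_by (A - B + 1).toNat
decreasing_by omega

def calculate (A : Int) (B : Int) (C : Int) : Int :=
  if B < 2 ∨ C < 3 then -1
  else
    let r := calcLoopC B C 0
    calcLoopB A r.1 r.2

-- ===== PORT B =====
def calculate_alt (A : Int) (B : Int) (C : Int) : Int :=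
  if B < 2 ∨ C < 3 then -1
  else
    let d1 := max 0 (B - C + 1)
    let d2 := max 0 (A - (B - d1) + 1)
    d1 + d2

-- ===== PRECONDITION & SPEC =====
def Spec_calculate (A : Int) (B : Int) (C : Int) (out : Int) : Prop := out = calculate_alt A B C
instance (A : Int) (B : Int) (C : Int) (out : Int) : Decidable (Spec_calculate A B C out) := by unfold Spec_calculate; infer_instance

-- ===== CLAIM (what is proved, stated in full; the proofs are below) =====
def Claim_equal_calculate : Prop := ∀ (A : Int) (B : Int) (C : Int), Dom_calculate A B C → Spec_calculate A B C (calculate A B C)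

-- ===== LEMMAS AND PROOFS =====

-- ===== VERDICT (by name: the statement is the Claim_ definition above) =====
theorem calcLoopC_eq (B C cnt : Int) :
    calcLoopC B C cnt = (min B (C - 1), cnt + max 0 (B - C + 1)) := by
  by_cases h : C ≤ B
  · rw [calcLoopC, if_pos h, calcLoopC_eq (B - 1) C (cnt + 1)]
    simp only [Prod.mk.injEq]; constructor <;> omega
  · rw [calcLoopC, if_neg h]
    simp only [Prod.mk.injEq]; constructor <;> omega
termination_by (B - C + 1).toNat
decreasing_by omega

theorem calcLoopB_eq (A B cnt : Int) :
    calcLoopB A B cnt = cnt + max 0 (A - B + 1) := by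
  by_cases h : B ≤ A
  · rw [calcLoopB, if_pos h, calcLoopB_eq (A - 1) B (cnt + 1)]
    omega
  · rw [calcLoopB, if_neg h]
    omega
termination_by (A - B + 1).toNat
decreasing_by omega

theorem calculate_spec : Claim_equal_calculate := by
  intro A B C _
  unfold Spec_calculate calculate calculate_alt
  rw [calcLoopC_eq, calcLoopB_eq]
  by_cases h : B < 2 ∨ C < 3
  · rw [if_pos h, if_pos h]
  · rw [if_neg h, if_neg h]
    simp only
    omega
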